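-- pv_equiv track=rewrite | github.com/imnderoo/m_s_p | miseq_pipe/scripts/python_modules/vcreports/parser.py | parseAndFilterGenoValues
-- ===== SOURCE A (Python) =====
-- def parseAndFilterGenoValues(genoHeaderCol, genoValCol, interestedGenoFields):
-- 	genoDict = dict.fromkeys(interestedGenoFields, "NA")
-- 	genoHeader = genoHeaderCol.split(':')
-- 	genoVal = genoValCol.split(':')
--
-- 	if len(genoHeader) == len(genoVal):
-- 		for idx in enumerate(genoHeader):
-- 			num = idx[0]
-- 			header = idx[1]
-- 			if header in genoDict:
-- 				genoDict[header] = genoVal[num]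
--
-- 			"""
-- 			"GT" # 0/0  - Homo reference 0/1 - Hetero 1/1 Homo alternate
-- 			"AD(Ref,Alt)" = genoArray[idx] # Depth per allele - REF depth / ALT depth
-- 			"DP" # Total depth of reads - Flag if DP < 20
-- 			"GQ" # Genotype quality. Phred-scale confidence that GT is true. Flag if < 30
-- 			"SB" # Strand Bias. Flag as strand bias if value is >= 0
-- 			"""
-- 	return genoDict
-- ===== SOURCE B (Python) =====
-- def parseAndFilterGenoValues(genoHeaderCol, genoValCol, interestedGenoFields):
-- 	genoHeader = genoHeaderCol.split(':')
-- 	genoVal = genoValCol.split(':')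
-- 	if len(genoHeader) == len(genoVal):
-- 		valByHeader = dict(zip(genoHeader, genoVal))
-- 		return {f: valByHeader.get(f, "NA") for f in interestedGenoFields}
-- 	return dict.fromkeys(interestedGenoFields, "NA")
-- ===== Notes on version B (the rewrite author's own statement) =====
-- stated objective: simpler
-- what changed: Instead of scanning the header list and testing each header for membership in the pre-seeded NA dict, B builds one header->value table from zip(genoHeader, genoVal) and constructs the result by a single lookup per interested field (reversed traversal direction).
import Mathlib
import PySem

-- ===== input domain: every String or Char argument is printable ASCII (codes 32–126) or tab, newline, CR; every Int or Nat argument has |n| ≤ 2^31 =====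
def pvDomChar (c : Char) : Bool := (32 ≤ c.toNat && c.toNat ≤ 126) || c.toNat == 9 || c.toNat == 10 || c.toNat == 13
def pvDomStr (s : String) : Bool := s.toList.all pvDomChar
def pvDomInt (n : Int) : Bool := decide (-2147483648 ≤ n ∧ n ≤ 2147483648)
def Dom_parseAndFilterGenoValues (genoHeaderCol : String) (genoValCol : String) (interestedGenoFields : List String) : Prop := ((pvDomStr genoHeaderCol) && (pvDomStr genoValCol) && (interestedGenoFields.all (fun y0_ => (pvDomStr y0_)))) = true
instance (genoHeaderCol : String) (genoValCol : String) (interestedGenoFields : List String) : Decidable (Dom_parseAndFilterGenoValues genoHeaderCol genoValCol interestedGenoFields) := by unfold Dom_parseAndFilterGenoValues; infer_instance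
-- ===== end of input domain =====

-- B builds a header->value table once (dict(zip(...))) and assembles the result by one lookup
-- per interested field, instead of scanning the headers and testing membership: simpler decomposition.


-- ===== PORT A =====
def parseAndFilterGenoValues (genoHeaderCol : String) (genoValCol : String) (interestedGenoFields : List String) : List (String × String) :=
  -- genoDict = dict.fromkeys(interestedGenoFields, "NA")
  let genoDict0 : PySem.Dict String String :=
    interestedGenoFields.foldl (fun d f => d.insert f "NA") PySem.Dict.empty
  let genoHeader := (PySem.Str.split? genoHeaderCol ":").getD []
  let genoVal := (PySem.Str.split? genoValCol ":").getD []
  let genoDict :=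
    if genoHeader.length = genoVal.length then
      -- for idx in enumerate(genoHeader): … genoDict[header] = genoVal[num]
      -- (the index is always in range inside this branch, so the .getD default is never used)
      (PySem.List.enumerate genoHeader 0).foldl
        (fun d p => if d.contains p.2 then d.insert p.2 ((PySem.List.pyGet? genoVal p.1).getD "") else d)
        genoDict0
    else genoDict0
  genoDict.items

-- ===== PORT B =====
def parseAndFilterGenoValues_alt (genoHeaderCol : String) (genoValCol : String) (interestedGenoFields : List String) : List (String × String) :=
  let genoHeader := (PySem.Str.split? genoHeaderCol ":").getD []
  let genoVal := (PySem.Str.split? genoValCol ":").getD []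
  if genoHeader.length = genoVal.length then
    -- valByHeader = dict(zip(genoHeader, genoVal))
    let valByHeader : PySem.Dict String String :=
      (genoHeader.zip genoVal).foldl (fun d p => d.insert p.1 p.2) PySem.Dict.empty
    -- {f: valByHeader.get(f, "NA") for f in interestedGenoFields}
    (interestedGenoFields.foldl (fun d f => d.insert f (valByHeader.getD f "NA"))
      (PySem.Dict.empty : PySem.Dict String String)).items
  else
    -- dict.fromkeys(interestedGenoFields, "NA")
    (interestedGenoFields.foldl (fun d f => d.insert f "NA")
      (PySem.Dict.empty : PySem.Dict String String)).items

-- ===== PRECONDITION & SPEC =====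
def Spec_parseAndFilterGenoValues (genoHeaderCol : String) (genoValCol : String) (interestedGenoFields : List String) (out : List (String × String)) : Prop := out = parseAndFilterGenoValues_alt genoHeaderCol genoValCol interestedGenoFields
instance (genoHeaderCol : String) (genoValCol : String) (interestedGenoFields : List String) (out : List (String × String)) : Decidable (Spec_parseAndFilterGenoValues genoHeaderCol genoValCol interestedGenoFields out) := by unfold Spec_parseAndFilterGenoValues; infer_instance

-- ===== CLAIM (what is proved, stated in full; the proofs are below) =====
def Claim_equal_parseAndFilterGenoValues : Prop := ∀ (genoHeaderCol : String) (genoValCol : String) (interestedGenoFields : List String), Dom_parseAndFilterGenoValues genoHeaderCol genoValCol interestedGenoFields → Spec_parseAndFilterGenoValues genoHeaderCol genoValCol interestedGenoFields (parseAndFilterGenoValues genoHeaderCol genoValCol interestedGenoFields)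

-- ===== LEMMAS AND PROOFS =====

/-- value of the LAST pair with first component `k` (Python dict "last wins"). -/
def pvLastVal? (pairs : List (String × String)) (k : String) : Option String :=
  pairs.foldl (fun a p => if p.1 = k then some p.2 else a) none

theorem pvLastVal?_foldl (pairs : List (String × String)) (k : String) (acc : Option String) :
    pairs.foldl (fun a p => if p.1 = k then some p.2 else a) acc = (pvLastVal? pairs k).or acc := by
  induction pairs generalizing acc with
  | nil => simp [pvLastVal?]
  | cons p rest ih =>
    rw [List.foldl_cons, ih]
    have hL : pvLastVal? (p :: rest) k = (pvLastVal? rest k).or (if p.1 = k then some p.2 else none) := by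
      unfold pvLastVal?
      rw [List.foldl_cons, ih]
      rfl
    rw [hL]
    by_cases h : p.1 = k
    · simp [h]
    · simp [h]

theorem pvLastVal?_cons (p : String × String) (rest : List (String × String)) (k : String) :
    pvLastVal? (p :: rest) k = (pvLastVal? rest k).or (if p.1 = k then some p.2 else none) := by
  unfold pvLastVal?
  rw [List.foldl_cons, pvLastVal?_foldl]
  rfl

/-- get? through the value-inserting fold (dict(zip(...))). -/
theorem pvGet?_insFold (pairs : List (String × String)) (k : String) (e : PySem.Dict String String) :
    (pairs.foldl (fun d p => d.insert p.1 p.2) e).get? k = (pvLastVal? pairs k).or (e.get? k) := by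
  induction pairs generalizing e with
  | nil => simp [pvLastVal?]
  | cons p rest ih =>
    rw [List.foldl_cons, ih, pvLastVal?_cons, PySem.Dict.get?_insert]
    by_cases h : p.1 = k
    · subst h; simp
    · simp [h, Ne.symm h]


/-- get? through a fold inserting a key-determined value. -/
theorem pvGet?_valFold (fields : List String) (val : String → String) (k : String)
    (e : PySem.Dict String String) :
    (fields.foldl (fun d f => d.insert f (val f)) e).get? k
      = if k ∈ fields then some (val k) else e.get? k := by
  induction fields generalizing e with
  | nil => simp
  | cons f rest ih =>
    simp only [List.foldl_cons, ih, PySem.Dict.get?_insert, List.mem_cons]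
    by_cases hr : k ∈ rest <;> by_cases hf : k = f <;> simp [hr, hf]

/-- the conditional-update loop of A preserves the key list. -/
theorem pvKeys_condFold (pairs : List (String × String)) (d : PySem.Dict String String) :
    (pairs.foldl (fun d p => if d.contains p.1 then d.insert p.1 p.2 else d) d).keys = d.keys := by
  induction pairs generalizing d with
  | nil => simp
  | cons p rest ih =>
    rw [List.foldl_cons]
    by_cases h : d.contains p.1
    · simp only [h, if_true]
      rw [ih, PySem.Dict.keys_insert_of_contains d p.2 h]
    · simp [h, ih]

/-- get? through A's conditional-update loop. -/
theorem pvGet?_condFold (pairs : List (String × String)) (k : String) (d : PySem.Dict String String) :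
    (pairs.foldl (fun d p => if d.contains p.1 then d.insert p.1 p.2 else d) d).get? k
      = if d.contains k then (pvLastVal? pairs k).or (d.get? k) else d.get? k := by
  induction pairs generalizing d with
  | nil => simp [pvLastVal?]
  | cons p rest ih =>
    rw [List.foldl_cons, pvLastVal?_cons]
    by_cases hc : d.contains p.1
    · simp only [hc, if_true, ih]
      have hck : (d.insert p.1 p.2).contains k = d.contains k := by
        rw [PySem.Dict.contains_insert]
        by_cases h : k = p.1 <;> simp [h, hc]
      rw [hck, PySem.Dict.get?_insert]
      by_cases hk : d.contains k <;> by_cases hkp : k = p.1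
      · subst hkp; simp_all
      · simp_all [Ne.symm hkp]
      · subst hkp; simp_all
      · simp_all
    · simp only [hc, ih]
      by_cases hk : d.contains k
      · by_cases hkp : k = p.1
        · subst hkp; simp_all
        · simp [hk, Ne.symm hkp]
      · simp [hk]

/-- A's enumerate-and-index loop is the zip loop (equal lengths; `pre` tracks consumed values). -/
theorem pvEnumFold_eq_zipFold (hs vs pre : List String) (d : PySem.Dict String String)
    (hlen : hs.length = vs.length) :
    (PySem.List.enumerate hs (pre.length : Int)).foldl
        (fun d p => if d.contains p.2 then d.insert p.2 ((PySem.List.pyGet? (pre ++ vs) p.1).getD "") else d) d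
      = (hs.zip vs).foldl (fun d p => if d.contains p.1 then d.insert p.1 p.2 else d) d := by
  induction hs generalizing vs pre d with
  | nil => simp [PySem.List.enumerate]
  | cons h hs ih =>
    cases vs with
    | nil => simp at hlen
    | cons v vs =>
      rw [PySem.List.enumerate_cons, List.zip_cons_cons, List.foldl_cons, List.foldl_cons,
        PySem.List.pyGet?_append_length]
      have hpre : (pre.length : Int) + 1 = (((pre ++ [v]).length : Nat) : Int) := by
        simp
      rw [hpre]
      have := ih vs (pre ++ [v]) (if d.contains h then d.insert h v else d) (by simpa using hlen)
      simp only [List.append_assoc, List.singleton_append, Option.getD_some] at this ⊢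
      exact this

-- ===== VERDICT (by name: the statement is the Claim_ definition above) =====
theorem parseAndFilterGenoValues_spec : Claim_equal_parseAndFilterGenoValues := by
  intro genoHeaderCol genoValCol interestedGenoFields _
  unfold Spec_parseAndFilterGenoValues parseAndFilterGenoValues parseAndFilterGenoValues_alt
  set hs := (PySem.Str.split? genoHeaderCol ":").getD [] with hhs
  set vs := (PySem.Str.split? genoValCol ":").getD [] with hvs
  by_cases hlen : hs.length = vs.length
  · simp only [hlen, if_true]
    -- rewrite A's loop into the zip loop
    have henum := pvEnumFold_eq_zipFold hs vs []
        (interestedGenoFields.foldl (fun d f => d.insert f "NA") PySem.Dict.empty) hlen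
    simp only [List.nil_append, List.length_nil, Nat.cast_zero] at henum
    rw [henum]
    -- both sides are dicts with the same keys and the same lookups
    set d0 : PySem.Dict String String :=
      interestedGenoFields.foldl (fun d f => d.insert f "NA") PySem.Dict.empty with hd0
    set W : PySem.Dict String String :=
      (hs.zip vs).foldl (fun d p => d.insert p.1 p.2) PySem.Dict.empty with hW
    set dA := (hs.zip vs).foldl (fun d p => if d.contains p.1 then d.insert p.1 p.2 else d) d0 with hdA
    set dB := interestedGenoFields.foldl (fun d f => d.insert f (W.getD f "NA")) PySem.Dict.empty with hdB
    have hg0 : ∀ k, d0.get? k = if k ∈ interestedGenoFields then some "NA" else none := by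
      intro k; rw [hd0, pvGet?_valFold interestedGenoFields (fun _ => "NA") k]; simp
    have hc0 : ∀ k, d0.contains k = decide (k ∈ interestedGenoFields) := by
      intro k; rw [PySem.Dict.contains_eq_isSome_get?, hg0]
      by_cases h : k ∈ interestedGenoFields <;> simp [h]
    have hWk : ∀ k, W.get? k = pvLastVal? (hs.zip vs) k := by
      intro k; rw [hW, pvGet?_insFold]; simp
    have hget : ∀ k, dA.get? k = dB.get? k := by
      intro k
      rw [hdA, pvGet?_condFold, hdB, pvGet?_valFold interestedGenoFields (fun f => W.getD f "NA") k,
        hc0, hg0]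
      by_cases h : k ∈ interestedGenoFields
      · simp only [h, decide_true, if_true]
        rw [PySem.Dict.getD_eq_get?_getD, hWk]
        cases pvLastVal? (hs.zip vs) k <;> simp
      · simp [h]
    have hkeys : dA.keys = dB.keys := by
      rw [hdA, pvKeys_condFold, hd0, hdB,
        PySem.Dict.keys_foldl_insert, PySem.Dict.keys_foldl_insert]
    have hnodB : dB.keys.Nodup := by
      rw [hdB]; exact PySem.Dict.nodup_keys_foldl_insert _ _ _ PySem.Dict.nodup_keys_empty
    have hnodA : dA.keys.Nodup := by rw [hkeys]; exact hnodB
    rw [PySem.Dict.items_eq_map_keys dA hnodA "NA", PySem.Dict.items_eq_map_keys dB hnodB "NA", hkeys]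
    exact List.map_congr_left fun k _ => by
      rw [PySem.Dict.getD_eq_get?_getD, PySem.Dict.getD_eq_get?_getD, hget k]
  · simp [hlen]
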